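-- pv_equiv track=rewrite | github.com/ShiroYasha18/ibm_dpk-project | finalflow/flow/app.py | _clean_prompt_artifacts
-- ===== SOURCE A (Python) =====
-- def _clean_prompt_artifacts(text):
--     """Remove any prompt-like artifacts from the extracted text."""
--     # Remove common phrases that might be included
--     phrases_to_remove = [
--         "Here is the extracted text:",
--         "Extracted text:",
--         "Here's what I found:",
--         "Here is what we found:",
--         "We were unable to identify a diagram in this image.",
--         "**Diagram Identification and Description:**",
--         "There are no diagrams or images in this document.",
--         "## Page",
--     ]
--
--     for phrase in phrases_to_remove:
--         text = text.replace(phrase, "")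
--
--     # Remove instruction-like content
--     lines = text.split('\n')
--     filtered_lines = []
--     skip_section = False
--
--     for line in lines:
--         # Skip lines that look like instructions
--         if any(marker in line.lower() for marker in ["extract all text", "for diagrams", "formatting rules"]):
--             skip_section = True
--             continue
--
--         if skip_section and line.strip() == "":
--             skip_section = False
--             continue
--
--         if not skip_section:
--             filtered_lines.append(line)
--
--     return '\n'.join(filtered_lines).strip()
-- ===== SOURCE B (Python) =====
-- def _clean_prompt_artifacts(text):
--     """Remove any prompt-like artifacts from the extracted text."""
--     text = (text
--             .replace("Here is the extracted text:", "")
--             .replace("Extracted text:", "")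
--             .replace("Here's what I found:", "")
--             .replace("Here is what we found:", "")
--             .replace("We were unable to identify a diagram in this image.", "")
--             .replace("**Diagram Identification and Description:**", "")
--             .replace("There are no diagrams or images in this document.", "")
--             .replace("## Page", ""))
--
--     lines = text.split('\n')
--     markers = ("extract all text", "for diagrams", "formatting rules")
--     kept = []
--     i = 0
--     n = len(lines)
--     while i < n:
--         low = lines[i].lower()
--         if any(m in low for m in markers):
--             # skip this block: drop lines until one blank line is consumed
--             i += 1
--             while i < n and lines[i].strip() != "":
--                 i += 1
--             i += 1
--             continue
--         kept.append(lines[i])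
--         i += 1
--     return '\n'.join(kept).strip()
-- ===== Notes on version B (the rewrite author's own statement) =====
-- stated objective: alternative
-- what changed: Replaces the skip_section boolean-flag fold (flag threaded through every line) with an index-based while loop whose inner loop consumes a whole skipped block (up to and including its terminating blank line) at once, and unrolls the phrase-removal loop into a chain of replace calls.
import Mathlib
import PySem

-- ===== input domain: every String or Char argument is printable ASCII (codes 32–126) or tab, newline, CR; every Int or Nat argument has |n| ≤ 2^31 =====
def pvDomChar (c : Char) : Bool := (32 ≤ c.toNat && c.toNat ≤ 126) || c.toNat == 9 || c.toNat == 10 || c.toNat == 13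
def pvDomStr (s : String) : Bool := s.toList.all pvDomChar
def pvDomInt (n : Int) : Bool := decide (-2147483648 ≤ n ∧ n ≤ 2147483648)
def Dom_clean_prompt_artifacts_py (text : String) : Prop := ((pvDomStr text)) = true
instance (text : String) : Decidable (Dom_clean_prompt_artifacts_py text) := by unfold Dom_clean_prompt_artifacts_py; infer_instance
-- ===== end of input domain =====

-- B replaces A's skip_section boolean-flag fold with an index/block-consuming nested while loop
-- (ported as recursion over the remaining lines) and unrolls the phrase loop into chained replaces;
-- same return value, alternative structure.

-- ===== PORT A =====
def pvPhrasesA : List String :=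
  ["Here is the extracted text:",
   "Extracted text:",
   "Here's what I found:",
   "Here is what we found:",
   "We were unable to identify a diagram in this image.",
   "**Diagram Identification and Description:**",
   "There are no diagrams or images in this document.",
   "## Page"]

-- any(marker in line.lower() for marker in [...])
def pvMarkerA (line : List Char) : Bool :=
  (["extract all text".toList, "for diagrams".toList, "formatting rules".toList]).any
    (fun m => PySem.Chars.isIn m (PySem.Chars.lower line))

def clean_prompt_artifacts_py (text : String) : String :=
  let t := pvPhrasesA.foldl (fun t p => PySem.Str.replace t p "") text
  let lines := PySem.Chars.splitOn t.toList ['\n']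
  let st := lines.foldl
    (fun (st : Bool × List (List Char)) line =>
      if pvMarkerA line then (true, st.2)
      else if st.1 && (PySem.Chars.strip line == []) then (false, st.2)
      else if !st.1 then (st.1, st.2 ++ [line])
      else st)
    (false, ([] : List (List Char)))
  String.ofList (PySem.Chars.strip (PySem.Chars.join ['\n'] st.2))

-- ===== PORT B =====
def pvMarkerB (line : List Char) : Bool :=
  (["extract all text".toList, "for diagrams".toList, "formatting rules".toList]).any
    (fun m => PySem.Chars.isIn m (PySem.Chars.lower line))

-- inner while loop: advance past non-blank lines, then past the blank one
def pvSkipB : List (List Char) → List (List Char)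
  | [] => []
  | l :: ls => if PySem.Chars.strip l == [] then ls else pvSkipB ls

theorem pvSkipB_len (ls : List (List Char)) : (pvSkipB ls).length ≤ ls.length := by
  induction ls with
  | nil => simp [pvSkipB]
  | cons l ls ih =>
    simp only [pvSkipB]
    split
    · simp
    · exact Nat.le_succ_of_le ih

-- outer while loop over the line index
def pvGoB : List (List Char) → List (List Char)
  | [] => []
  | l :: ls => if pvMarkerB l then pvGoB (pvSkipB ls) else l :: pvGoB ls
  termination_by ls => ls.length
  decreasing_by
  · exact Nat.lt_succ_of_le (pvSkipB_len ls)
  · simp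

def clean_prompt_artifacts_py_alt (text : String) : String :=
  let t := PySem.Str.replace (PySem.Str.replace (PySem.Str.replace (PySem.Str.replace
           (PySem.Str.replace (PySem.Str.replace (PySem.Str.replace (PySem.Str.replace
             text
             "Here is the extracted text:" "")
             "Extracted text:" "")
             "Here's what I found:" "")
             "Here is what we found:" "")
             "We were unable to identify a diagram in this image." "")
             "**Diagram Identification and Description:**" "")
             "There are no diagrams or images in this document." "")
             "## Page" ""
  String.ofList (PySem.Chars.strip (PySem.Chars.join ['\n'] (pvGoB (PySem.Chars.splitOn t.toList ['\n']))))

-- ===== PRECONDITION & SPEC =====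
def Spec_clean_prompt_artifacts_py (text : String) (out : String) : Prop := out = clean_prompt_artifacts_py_alt text
instance (text : String) (out : String) : Decidable (Spec_clean_prompt_artifacts_py text out) := by unfold Spec_clean_prompt_artifacts_py; infer_instance

-- ===== CLAIM (what is proved, stated in full; the proofs are below) =====
def Claim_equal_clean_prompt_artifacts_py : Prop := ∀ (text : String), Dom_clean_prompt_artifacts_py text → Spec_clean_prompt_artifacts_py text (clean_prompt_artifacts_py text)

-- ===== LEMMAS AND PROOFS =====

-- A's loop body, named for the proofs (definitionally the lambda in the port)
def pvStepA (st : Bool × List (List Char)) (line : List Char) : Bool × List (List Char) :=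
  if pvMarkerA line then (true, st.2)
  else if st.1 && (PySem.Chars.strip line == []) then (false, st.2)
  else if !st.1 then (st.1, st.2 ++ [line])
  else st

theorem pv_all_isspace_of_strip_nil (l : List Char) (h : PySem.Chars.strip l = []) :
    ∀ c ∈ l, PySem.Chars.isspace c = true := by
  intro c hc
  simp only [PySem.Chars.strip, PySem.Chars.rstrip, PySem.Chars.lstrip] at h
  rw [List.reverse_eq_nil_iff, List.dropWhile_eq_nil_iff] at h
  rcases List.mem_append.mp
      ((List.takeWhile_append_dropWhile (p := PySem.Chars.isspace) (l := l)) ▸ hc) with h1 | h1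
  · exact List.mem_takeWhile_imp h1
  · exact h c (List.mem_reverse.mpr h1)

theorem pv_space_fix (c : Char) (h : PySem.Chars.isspace c = true) :
    PySem.Chars.lowerChar c = c := by
  have hu : PySem.Chars.isupper c = false := by
    simp only [PySem.Chars.isspace, Bool.or_eq_true, Bool.and_eq_true, decide_eq_true_eq] at h
    have h2 : c.toNat < 65 ∨ 90 < c.toNat := by omega
    simp only [PySem.Chars.isupper, Bool.and_eq_false_iff, decide_eq_false_iff_not]
    rcases h2 with h2 | h2
    · exact Or.inl (Char.not_le.mpr (Char.lt_def.mpr h2))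
    · exact Or.inr (Char.not_le.mpr (Char.lt_def.mpr h2))
  simp [PySem.Chars.lowerChar, hu]

-- a marker line is never blank (every marker contains non-space characters)
theorem pvMarker_nonblank (l : List Char) (hm : pvMarkerA l = true) :
    (PySem.Chars.strip l == ([] : List Char)) = false := by
  rw [Bool.eq_false_iff]
  intro hb
  have hb' : PySem.Chars.strip l = [] := by simpa using hb
  have hall := pv_all_isspace_of_strip_nil l hb'
  rcases List.any_eq_true.mp hm with ⟨m, hmem, hIn⟩
  have hsub := (PySem.Chars.isIn_iff_infix m (PySem.Chars.lower l)).mp hIn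
  have hex : ∃ c0, c0 ∈ m ∧ PySem.Chars.isspace c0 = false := by
    simp only [List.mem_cons, List.not_mem_nil, or_false] at hmem
    rcases hmem with rfl | rfl | rfl
    · exact ⟨'e', by decide, by decide⟩
    · exact ⟨'f', by decide, by decide⟩
    · exact ⟨'f', by decide, by decide⟩
  rcases hex with ⟨c0, hc0m, hc0s⟩
  have hc0 : c0 ∈ PySem.Chars.lower l := hsub.subset hc0m
  simp only [PySem.Chars.lower, List.mem_map] at hc0
  rcases hc0 with ⟨a, hal, ha⟩
  have hsp := hall a hal
  rw [pv_space_fix a hsp] at ha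
  rw [ha] at hsp
  rw [hsp] at hc0s
  cases hc0s

-- A's flag-carrying fold computes B's block recursion, for both values of the flag.
theorem pvLoop_eq (lines : List (List Char)) :
    (∀ acc : List (List Char),
      (lines.foldl pvStepA (false, acc)).2 = acc ++ pvGoB lines) ∧
    (∀ acc : List (List Char),
      (lines.foldl pvStepA (true, acc)).2 = acc ++ pvGoB (pvSkipB lines)) := by
  induction lines with
  | nil => simp [pvGoB, pvSkipB]
  | cons l ls ih =>
    have hMB : pvMarkerB l = pvMarkerA l := rfl
    constructor
    · intro acc
      by_cases hm : pvMarkerA l = true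
      · have h1 : pvStepA (false, acc) l = (true, acc) := by simp [pvStepA, hm]
        have h2 : pvGoB (l :: ls) = pvGoB (pvSkipB ls) := by rw [pvGoB, hMB, hm]; simp
        rw [List.foldl_cons, h1, h2]
        exact ih.2 acc
      · have h1 : pvStepA (false, acc) l = (false, acc ++ [l]) := by simp [pvStepA, hm]
        have h2 : pvGoB (l :: ls) = l :: pvGoB ls := by
          rw [pvGoB, hMB]
          simp [hm]
        rw [List.foldl_cons, h1, h2, ih.1 (acc ++ [l])]
        simp
    · intro acc
      by_cases hm : pvMarkerA l = true
      · have hnb := pvMarker_nonblank l hm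
        have h1 : pvStepA (true, acc) l = (true, acc) := by simp [pvStepA, hm]
        have h2 : pvSkipB (l :: ls) = pvSkipB ls := by rw [pvSkipB, hnb]; simp
        rw [List.foldl_cons, h1, h2]
        exact ih.2 acc
      · by_cases hb : (PySem.Chars.strip l == ([] : List Char)) = true
        · have h1 : pvStepA (true, acc) l = (false, acc) := by simp [pvStepA, hm, hb]
          have h2 : pvSkipB (l :: ls) = ls := by rw [pvSkipB, hb]; simp
          rw [List.foldl_cons, h1, h2]
          exact ih.1 acc
        · have h1 : pvStepA (true, acc) l = (true, acc) := by
            simp [pvStepA, hm]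
            simp at hb
            simp [hb]
          have h2 : pvSkipB (l :: ls) = pvSkipB ls := by
            rw [pvSkipB]
            simp at hb
            simp [hb]
          rw [List.foldl_cons, h1, h2]
          exact ih.2 acc

-- ===== VERDICT (by name: the statement is the Claim_ definition above) =====
theorem clean_prompt_artifacts_py_spec : Claim_equal_clean_prompt_artifacts_py := by
  intro text _
  unfold Spec_clean_prompt_artifacts_py clean_prompt_artifacts_py clean_prompt_artifacts_py_alt
  show String.ofList (PySem.Chars.strip (PySem.Chars.join ['\n']
      ((PySem.Chars.splitOn ((pvPhrasesA.foldl (fun t p => PySem.Str.replace t p "") text)).toList ['\n']).foldl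
        pvStepA (false, ([] : List (List Char)))).2)) = _
  rw [(pvLoop_eq _).1 []]
  simp [pvPhrasesA, List.foldl]
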